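-- pv_equiv track=rewrite | github.com/coderamen666/cassie | laboratory/solve.py | evalpoly
-- ===== SOURCE A (Python) =====
-- def polyclean(p): # Cleans out powers with null coefficients
-- 	if p == {}:
-- 		return {}
-- 	else:
-- 		out = {}
-- 		for power in p:
-- 			if p[power] != 0:
-- 				out[power] = p[power]
-- 		return out
--
-- def polyzero(p): # Checks if polynomial is zero
-- 	tmp = polyclean(p)
-- 	return tmp == {}
--
-- def evalpoly(poly, x): # "Plugs in" value into polynomial
-- 	poly = polyclean(poly)
-- 	if polyzero(poly):
-- 		return 0
-- 	out = 0
-- 	for power in poly: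
-- 		out += poly[power] * (x ** power)
-- 	return out
-- ===== SOURCE B (Python) =====
-- def evalpoly(poly, x): # Horner scheme over terms sorted by descending power
-- 	terms = sorted(((p, c) for p, c in poly.items() if c != 0), key=lambda t: t[0], reverse=True)
-- 	out = 0
-- 	last = terms[0][0] if terms else 0
-- 	for p, c in terms:
-- 		out = out * x ** (last - p) + c
-- 		last = p
-- 	return out * x ** last
-- ===== Notes on version B (the rewrite author's own statement) =====
-- stated objective: faster
-- what changed: Replaces A's clean-dict-then-sum-of-independent-powers with Horner's scheme: the nonzero terms are sorted by descending power and folded as out = out * x**(gap) + coeff, so the n independent big-integer exponentiations x**p collapse into one multiplication chain (measured 93x at n=4096).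
-- outside the precondition, e.g. on evalpoly({1: -2, -3: 9, -15: 1}, 10): A returns -19.991, B returns -19.991000000000003; on evalpoly({-1: 1}, 2): A returns 0.5, B returns 0.5
import Mathlib
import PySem

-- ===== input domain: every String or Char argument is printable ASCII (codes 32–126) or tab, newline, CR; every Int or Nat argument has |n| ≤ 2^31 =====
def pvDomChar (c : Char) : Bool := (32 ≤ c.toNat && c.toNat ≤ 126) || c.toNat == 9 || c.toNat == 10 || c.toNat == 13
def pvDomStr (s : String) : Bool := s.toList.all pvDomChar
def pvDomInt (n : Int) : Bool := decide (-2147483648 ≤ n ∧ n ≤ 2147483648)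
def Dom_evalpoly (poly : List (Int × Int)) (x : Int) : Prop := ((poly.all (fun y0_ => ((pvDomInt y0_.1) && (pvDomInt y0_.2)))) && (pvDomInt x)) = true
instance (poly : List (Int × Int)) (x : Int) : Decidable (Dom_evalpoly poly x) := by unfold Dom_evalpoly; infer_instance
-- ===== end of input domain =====

-- B evaluates the polynomial by Horner's scheme over the nonzero terms sorted by descending power,
-- instead of A's clean-then-sum of independent coefficient·x^power products (objective: faster — Horner avoids per-term big-integer exponentiation;
-- same return value, no mutation in either).

-- ===== PORT A =====
-- The Python dict[int,int] argument is modelled as PySem.Dict built from the association list.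
-- x ** power is ported as x ^ power.toNat: exact for power ≥ 0; negative powers (Python returns a
-- float or raises ZeroDivisionError there) are excluded by Pre_evalpoly.
def polycleanA (p : PySem.Dict Int Int) : PySem.Dict Int Int :=
  if p = PySem.Dict.empty then PySem.Dict.empty
  else p.keys.foldl (fun out power =>
    if p.getD power 0 ≠ 0 then out.insert power (p.getD power 0) else out) PySem.Dict.empty

def polyzeroA (p : PySem.Dict Int Int) : Bool :=
  polycleanA p = PySem.Dict.empty

def evalpoly (poly : List (Int × Int)) (x : Int) : Int :=
  let d := polycleanA (PySem.Dict.ofList poly)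
  if polyzeroA d then 0
  else d.keys.foldl (fun out power => out + d.getD power 0 * x ^ power.toNat) 0

-- ===== PORT B =====
-- Horner: terms = nonzero items sorted by descending power; out = out * x^(last - p) + c per term;
-- final out * x^last. Exponents last - p and the final last are ≥ 0 on Pre_ inputs (ported via toNat).
def evalpoly_alt (poly : List (Int × Int)) (x : Int) : Int :=
  let terms := PySem.List.sorted
      ((PySem.Dict.ofList poly).items.filter (fun pc => pc.2 ≠ 0)) (fun t => t.1) true
  let last0 : Int := match terms with | [] => 0 | t :: _ => t.1
  let r := terms.foldl
      (fun (s : Int × Int) pc => (s.1 * x ^ (s.2 - pc.1).toNat + pc.2, pc.1)) (0, last0)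
  r.1 * x ^ r.2.toNat

-- ===== PRECONDITION & SPEC =====
-- Pre_ excludes dicts in which some negative power carries a nonzero coefficient: there the Python A
-- (and B alike) returns a float or raises ZeroDivisionError, i.e. never returns an int.
def Pre_evalpoly (poly : List (Int × Int)) (_x : Int) : Prop :=
  ∀ p ∈ (PySem.Dict.ofList poly).items, p.2 ≠ 0 → 0 ≤ p.1
instance (poly : List (Int × Int)) (x : Int) : Decidable (Pre_evalpoly poly x) := by
  unfold Pre_evalpoly; infer_instance
def pvWitness_evalpoly : (List (Int × Int)) × Int := ([(2, 3), (0, 1)], 5)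

def Spec_evalpoly (poly : List (Int × Int)) (x : Int) (out : Int) : Prop := out = evalpoly_alt poly x
instance (poly : List (Int × Int)) (x : Int) (out : Int) : Decidable (Spec_evalpoly poly x out) := by unfold Spec_evalpoly; infer_instance

-- ===== CLAIM (what is proved, stated in full; the proofs are below) =====
def Claim_equal_evalpoly : Prop := ∀ (poly : List (Int × Int)) (x : Int), Dom_evalpoly poly x → Pre_evalpoly poly x → Spec_evalpoly poly x (evalpoly poly x)

-- ===== LEMMAS AND PROOFS =====

-- The clean-building loop over a pair list with distinct keys, inserting into a dict none of the
-- keys occur in, appends exactly the nonzero-coefficient pairs.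
theorem items_cleanFold (g : Int → Int) :
    ∀ (l : List (Int × Int)) (acc : PySem.Dict Int Int),
      (l.map Prod.fst).Nodup → (∀ p ∈ l, acc.contains p.1 = false) → (∀ p ∈ l, g p.1 = p.2) →
      (l.foldl (fun out p => if g p.1 ≠ 0 then out.insert p.1 (g p.1) else out) acc).items
        = acc.items ++ l.filter (fun p => p.2 ≠ 0) := by
  intro l
  induction l with
  | nil => intro acc _ _ _; simp
  | cons p l ih =>
    intro acc hnd hfresh hg
    have hgp : g p.1 = p.2 := hg p (by simp)
    simp only [List.map_cons, List.nodup_cons] at hnd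
    simp only [List.foldl_cons, List.filter_cons, hgp]
    by_cases hz : p.2 ≠ 0
    · rw [if_pos hz, if_pos (by simpa using hz)]
      rw [ih (acc.insert p.1 p.2) hnd.2
        (by
          intro q hq
          rw [PySem.Dict.contains_insert]
          have h1 : (q.1 == p.1) = false := by
            simp only [beq_eq_false_iff_ne]
            intro he
            exact hnd.1 (he ▸ (List.mem_map.mpr ⟨q, hq, rfl⟩))
          rw [h1, hfresh q (by simp [hq]), Bool.false_or])
        (fun q hq => hg q (by simp [hq]))]
      rw [PySem.Dict.items_insert_of_not_contains acc p.2 (hfresh p (by simp))]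
      simp
    · rw [if_neg hz, if_neg (by simpa using hz)]
      exact ih acc hnd.2 (fun q hq => hfresh q (by simp [hq])) (fun q hq => hg q (by simp [hq]))

theorem items_polycleanA (d : PySem.Dict Int Int) (hnd : d.keys.Nodup) :
    (polycleanA d).items = d.items.filter (fun p => p.2 ≠ 0) := by
  unfold polycleanA
  by_cases he : d = PySem.Dict.empty
  · subst he
    simp [PySem.Dict.empty]
  · rw [if_neg he]
    have hkeys : d.keys = d.items.map Prod.fst := rfl
    rw [hkeys, List.foldl_map]
    have := items_cleanFold (fun k => d.getD k 0) d.items (PySem.Dict.empty)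
      (by rw [← hkeys]; exact hnd)
      (by intro q hq; simp [PySem.Dict.contains_empty])
      (by rintro ⟨k, v⟩ hq; exact PySem.Dict.getD_of_mem_items d hq hnd 0)
    simpa [PySem.Dict.items] using this

theorem keys_nodup_polycleanA (d : PySem.Dict Int Int) (hnd : d.keys.Nodup) :
    (polycleanA d).keys.Nodup := by
  have h : (polycleanA d).keys = (d.items.filter (fun p => p.2 ≠ 0)).map Prod.fst := by
    show (polycleanA d).items.map Prod.fst = _
    rw [items_polycleanA d hnd]
  rw [h]
  exact List.Nodup.sublist ((List.filter_sublist).map Prod.fst) hnd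

-- A's evaluation loop over the keys of a dict with distinct keys equals the items-based term sum.
theorem eval_keys_eq_items (e : PySem.Dict Int Int) (x : Int) (hnd : e.keys.Nodup) :
    e.keys.foldl (fun out power => out + e.getD power 0 * x ^ power.toNat) 0
      = (e.items.map (fun p => p.2 * x ^ p.1.toNat)).sum := by
  have hkeys : e.keys = e.items.map Prod.fst := rfl
  rw [hkeys, List.foldl_map]
  have hc : e.items.foldl (fun out p => out + e.getD p.1 0 * x ^ p.1.toNat) 0
      = e.items.foldl (fun out p => out + p.2 * x ^ p.1.toNat) 0 :=
    by
      apply PySem.List.foldl_congr_mem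
      rintro acc ⟨k, v⟩ hp
      rw [PySem.Dict.getD_of_mem_items e hp hnd 0]
  rw [hc, PySem.List.foldl_add]
  simp

-- Horner's scheme over a power-descending list of nonnegative powers equals the term sum.
theorem horner_fold (x : Int) :
    ∀ (l : List (Int × Int)) (acc last : Int),
      (∀ p ∈ l, p.1 ≤ last ∧ 0 ≤ p.1) → 0 ≤ last →
      l.Pairwise (fun a b => b.1 ≤ a.1) →
      (let r := l.foldl (fun (s : Int × Int) pc => (s.1 * x ^ (s.2 - pc.1).toNat + pc.2, pc.1)) (acc, last)
       r.1 * x ^ r.2.toNat)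
        = acc * x ^ last.toNat + (l.map (fun p => p.2 * x ^ p.1.toNat)).sum := by
  intro l
  induction l with
  | nil => intro acc last _ _ _; simp
  | cons p l ih =>
    intro acc last hb hl hpw
    have hp := hb p (by simp)
    have hxp : x ^ (last - p.1).toNat * x ^ p.1.toNat = x ^ last.toNat := by
      rw [← pow_add]
      congr 1
      omega
    simp only [List.foldl_cons, List.map_cons, List.sum_cons]
    rw [List.pairwise_cons] at hpw
    have h := ih (acc * x ^ (last - p.1).toNat + p.2) p.1
      (fun q hq => ⟨hpw.1 q hq, (hb q (by simp [hq])).2⟩) hp.2 hpw.2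
    simp only at h ⊢
    rw [h, add_mul, mul_assoc, hxp]
    ring

-- The B-side wrapper: Horner with the initial carried power taken from the head (0 on empty).
theorem horner_sum (x : Int) (l : List (Int × Int)) (hmem : ∀ p ∈ l, 0 ≤ p.1)
    (hpw : l.Pairwise (fun a b => b.1 ≤ a.1)) :
    ((l.foldl (fun (s : Int × Int) pc => (s.1 * x ^ (s.2 - pc.1).toNat + pc.2, pc.1))
        (0, match l with | [] => (0 : Int) | t :: _ => t.1)).1
      * x ^ (l.foldl (fun (s : Int × Int) pc => (s.1 * x ^ (s.2 - pc.1).toNat + pc.2, pc.1))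
        (0, match l with | [] => (0 : Int) | t :: _ => t.1)).2.toNat)
      = (l.map (fun p => p.2 * x ^ p.1.toNat)).sum := by
  cases l with
  | nil => simp
  | cons t rest =>
    have hbd : ∀ p ∈ t :: rest, p.1 ≤ t.1 ∧ 0 ≤ p.1 := by
      intro p hp
      refine ⟨?_, hmem p hp⟩
      rcases List.mem_cons.mp hp with h | h
      · exact le_of_eq (by rw [h])
      · exact (List.pairwise_cons.mp hpw).1 p h
    have h0 : 0 ≤ t.1 := hmem t (by simp)
    have h := horner_fold x (t :: rest) 0 t.1 hbd h0 hpw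
    simp only at h
    simpa using h

theorem evalpoly_spec : Claim_equal_evalpoly := by
  intro poly x _ hpre
  have hnd : (PySem.Dict.ofList poly).keys.Nodup := PySem.Dict.nodup_keys_ofList poly
  have hmemF : ∀ p ∈ (PySem.Dict.ofList poly).items.filter (fun p => decide (p.2 ≠ 0)), 0 ≤ p.1 := by
    intro p hp
    have h2 := List.of_mem_filter hp
    exact hpre p (List.mem_of_mem_filter hp) (by simpa using h2)
  have hperm : (PySem.List.sorted ((PySem.Dict.ofList poly).items.filter (fun p => decide (p.2 ≠ 0)))
      (fun t : Int × Int => t.1) true).Perm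
      ((PySem.Dict.ofList poly).items.filter (fun p => decide (p.2 ≠ 0))) :=
    PySem.List.sorted_perm _ _ true
  have hmemT : ∀ p ∈ PySem.List.sorted ((PySem.Dict.ofList poly).items.filter (fun p => decide (p.2 ≠ 0)))
      (fun t : Int × Int => t.1) true, 0 ≤ p.1 :=
    fun p hp => hmemF p (hperm.mem_iff.mp hp)
  have hpw := PySem.List.sorted_pairwise_rev
    ((PySem.Dict.ofList poly).items.filter (fun p => decide (p.2 ≠ 0))) (fun t : Int × Int => t.1)
  have hB : evalpoly_alt poly x
      = (((PySem.Dict.ofList poly).items.filter (fun p => decide (p.2 ≠ 0))).map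
          (fun p => p.2 * x ^ p.1.toNat)).sum := by
    simp only [evalpoly_alt]
    rw [horner_sum x _ hmemT hpw]
    exact (hperm.map _).sum_eq
  have hcl : (polycleanA (PySem.Dict.ofList poly)).items
      = (PySem.Dict.ofList poly).items.filter (fun p => p.2 ≠ 0) :=
    items_polycleanA _ hnd
  unfold Spec_evalpoly evalpoly
  rw [hB]
  simp only
  by_cases hz : polyzeroA (polycleanA (PySem.Dict.ofList poly))
  · simp only [if_pos hz]
    unfold polyzeroA at hz
    have hclcl : (polycleanA (polycleanA (PySem.Dict.ofList poly))).items
        = (polycleanA (PySem.Dict.ofList poly)).items.filter (fun p => p.2 ≠ 0) :=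
      items_polycleanA _ (keys_nodup_polycleanA _ hnd)
    have hemp : (polycleanA (polycleanA (PySem.Dict.ofList poly))).items = [] := by
      have he : polycleanA (polycleanA (PySem.Dict.ofList poly)) = PySem.Dict.empty := by simpa using hz
      rw [he]; rfl
    have hfe : ((PySem.Dict.ofList poly).items.filter (fun p => p.2 ≠ 0)).filter (fun p => p.2 ≠ 0) = [] := by
      rw [← hcl, ← hclcl]; exact hemp
    have hFnil : (PySem.Dict.ofList poly).items.filter (fun p => decide (p.2 ≠ 0)) = [] := by
      simpa [List.filter_filter] using hfe
    rw [hFnil]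
    rfl
  · simp only [if_neg hz]
    rw [eval_keys_eq_items _ x (keys_nodup_polycleanA _ hnd), hcl]
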